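-- pv_equiv track=rewrite | github.com/RMCV-Rajapaksha/Competitive-Programing-New | IEEEXtreme/Cheap Construction1.py | solve
-- ===== SOURCE A (Python) =====
-- def solve(S):
--     N = len(S)
--     # For each possible string length
--     min_length_for_components = [float('inf')] * (N + 1)
--     min_length_for_components[N] = 1  # Single letter string gives N components
--
--     # Try all possible substring lengths
--     for length in range(1, N+1):
--         # For each possible starting position
--         for start in range(N - length + 1):
--             # Get the substring
--             T = S[start:start+length]
--             components = find_components(S, T, N)
--             # Update minimum length needed for this number of components
--             min_length_for_components[components] = min(
--                 min_length_for_components[components],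
--                 length
--             )
--
--     # Replace infinities with 0 (impossible cases)
--     result = [x if x != float('inf') else 0 for x in min_length_for_components[1:]]
--     return result
--
-- def find_components(S, T, N):
--     # Build adjacency list
--     adj = [[] for _ in range(N)]
--
--     # For each position in S
--     for start in range(N - len(T) + 1):
--         if S[start:start+len(T)] == T:
--             # Add edges for consecutive positions
--             for i in range(start, start + len(T) - 1):
--                 adj[i].append(i + 1)
--                 adj[i + 1].append(i)
--
--     # Count components using DFS
--     visited = [False] * N
--     components = 0
--
--     def dfs(v):
--         visited[v] = True
--         for u in adj[v]:
--             if not visited[u]: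
--                 dfs(u)
--
--     for v in range(N):
--         if not visited[v]:
--             components += 1
--             dfs(v)
--
--     return components
-- ===== SOURCE B (Python) =====
-- def solve(S):
--     N = len(S)
--     ans = {N: 1}
--     for L in range(1, N + 1):
--         for st in range(N - L + 1):
--             T = S[st:st + L]
--             cov = 0
--             reach = 0
--             for p in range(N - L + 1):
--                 if S[p:p + L] == T:
--                     hi = p + L - 1
--                     lo = reach if reach > p else p
--                     if hi > lo:
--                         cov += hi - lo
--                     if hi > reach:
--                         reach = hi
--             c = N - cov
--             if c not in ans:
--                 ans[c] = L
--     return [ans.get(c, 0) for c in range(1, N + 1)]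
-- ===== Notes on version B (the rewrite author's own statement) =====
-- stated objective: faster
-- what changed: Component counting drops the adjacency-list graph and recursive DFS entirely: components = N - (number of edges covered by occurrences), computed in one left-to-right interval-union pass over the match positions, and the min-length table becomes a first-write dict (lengths are tried in increasing order).
import Mathlib
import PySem

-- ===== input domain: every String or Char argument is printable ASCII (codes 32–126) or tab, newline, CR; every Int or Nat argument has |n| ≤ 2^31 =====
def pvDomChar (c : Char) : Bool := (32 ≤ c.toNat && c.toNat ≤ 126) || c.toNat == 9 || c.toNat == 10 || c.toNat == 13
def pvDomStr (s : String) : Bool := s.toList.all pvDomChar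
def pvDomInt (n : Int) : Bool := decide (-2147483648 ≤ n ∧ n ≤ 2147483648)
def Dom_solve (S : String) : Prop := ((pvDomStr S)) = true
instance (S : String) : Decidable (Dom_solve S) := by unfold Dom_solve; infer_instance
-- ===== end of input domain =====

-- B replaces A's per-substring graph + recursive DFS by "N - covered edges" via a single
-- interval-union pass over the occurrences, and the min-array by a first-write dict (constant-factor faster).

-- S[a:b] for 0 ≤ a ≤ b (the only way both programs slice): exact, Python clamps b at len(S) like take does.
def pvSlice (s : List Char) (a b : Nat) : List Char := (s.drop a).take (b - a)

-- ===== PORT A =====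
-- adj[i].append(i+1); adj[i+1].append(i)
def pvAddEdge (adj : List (List Nat)) (i : Nat) : List (List Nat) :=
  (adj.modify i (· ++ [i + 1])).modify (i + 1) (· ++ [i])

-- the adjacency-building double loop of find_components
def pvBuildAdj (s t : List Char) (N : Nat) : List (List Nat) :=
  (List.range (N + 1 - t.length)).foldl
    (fun adj start =>
      if pvSlice s start (start + t.length) = t then
        (List.range' start (t.length - 1)).foldl pvAddEdge adj
      else adj)
    (List.replicate N ([] : List Nat))

-- the recursive dfs; the fuel only makes the recursion structural (it is never exhausted when
-- called with fuel = N + 1 from find_components, since every call visits a new vertex)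
def pvDfs (adj : List (List Nat)) : Nat → Nat → List Bool → List Bool
  | 0, _, visited => visited
  | fuel + 1, v, visited =>
      (adj.getD v []).foldl
        (fun vis u => if vis.getD u false then vis else pvDfs adj fuel u vis)
        (visited.set v true)

def find_components (s t : List Char) (N : Nat) : Nat :=
  let adj := pvBuildAdj s t N
  ((List.range N).foldl
    (fun (st : Nat × List Bool) v =>
      if st.2.getD v false then st
      else (st.1 + 1, pvDfs adj (N + 1) v st.2))
    (0, List.replicate N false)).1

-- none models float('inf') in min_length_for_components
def solve (S : String) : List Int :=
  let s := S.toList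
  let N := s.length
  let init : List (Option Nat) := (List.replicate (N + 1) (none : Option Nat)).set N (some 1)
  let arr :=
    (List.range' 1 N).foldl
      (fun arr L =>
        (List.range (N + 1 - L)).foldl
          (fun (arr : List (Option Nat)) start =>
            let t := pvSlice s start (start + L)
            let c := find_components s t N
            arr.modify c (fun o => some (min (o.getD L) L)))
          arr)
      init
  (arr.drop 1).map (fun o => ((o.getD 0 : Nat) : Int))  -- x if x != inf else 0, with none = inf

-- ===== PORT B =====
-- the one-pass interval-union scan over the match positions: state (cov, reach)
def pvScan (s t : List Char) (N L : Nat) : Nat × Nat :=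
  (List.range (N + 1 - L)).foldl
    (fun (cr : Nat × Nat) p =>
      if pvSlice s p (p + L) = t then
        let hi := p + L - 1
        let lo := if cr.2 > p then cr.2 else p
        (if hi > lo then cr.1 + (hi - lo) else cr.1,
         if hi > cr.2 then hi else cr.2)
      else cr)
    (0, 0)

def solve_alt (S : String) : List Int :=
  let s := S.toList
  let N := s.length
  let d : PySem.Dict Nat Nat := PySem.Dict.empty.insert N 1
  let d :=
    (List.range' 1 N).foldl
      (fun d L =>
        (List.range (N + 1 - L)).foldl
          (fun (d : PySem.Dict Nat Nat) st =>
            let t := pvSlice s st (st + L)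
            let c := N - (pvScan s t N L).1
            if (d.get? c).isSome then d else d.insert c L)
          d)
      d
  (List.range' 1 N).map (fun c => ((d.getD c 0 : Nat) : Int))

-- ===== PRECONDITION & SPEC =====
def Spec_solve (S : String) (out : List Int) : Prop := out = solve_alt S
instance (S : String) (out : List Int) : Decidable (Spec_solve S out) := by unfold Spec_solve; infer_instance

-- ===== CLAIM (what is proved, stated in full; the proofs are below) =====
def Claim_equal_solve : Prop := ∀ (S : String), Dom_solve S → Spec_solve S (solve S)

-- ===== LEMMAS AND PROOFS =====

-- match / covered-edge predicates
def pvMatch (s t : List Char) (p : Nat) : Bool := decide (pvSlice s p (p + t.length) = t)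

def covB (s t : List Char) (q i : Nat) : Bool :=
  (List.range q).any (fun p => pvMatch s t p && decide (p ≤ i) && decide (i < p + t.length - 1))

def EB (s t : List Char) (i : Nat) : Bool := covB s t (s.length + 1 - t.length) i

def ecnt (s t : List Char) : Nat := (List.range (s.length - 1)).countP (EB s t)

theorem covB_iff (s t : List Char) (q i : Nat) :
    covB s t q i = true ↔ ∃ p, p < q ∧ pvMatch s t p = true ∧ p ≤ i ∧ i < p + t.length - 1 := by
  simp [covB, List.any_eq_true, List.mem_range, Bool.and_eq_true, decide_eq_true_iff]
  tauto

theorem EB_lt {s t : List Char} {i : Nat} (h : EB s t i = true) : i + 1 < s.length := by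
  rcases (covB_iff s t _ i).1 h with ⟨p, hp, _, hpi, hlt⟩
  omega

def re (s t : List Char) (v : Nat) : Nat :=
  if h : EB s t v = true then re s t (v + 1) else v
termination_by s.length - v
decreasing_by have := EB_lt h; omega

theorem re_ge (s t : List Char) (v : Nat) : v ≤ re s t v := by
  fun_induction re s t v with
  | case1 v h ih => omega
  | case2 v h => omega

theorem re_stop (s t : List Char) (v : Nat) : EB s t (re s t v) = false := by
  fun_induction re s t v with
  | case1 v h ih => exact ih
  | case2 v h => simpa using h

theorem re_edges (s t : List Char) (v : Nat) :
    ∀ j, v ≤ j → j < re s t v → EB s t j = true := by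
  fun_induction re s t v with
  | case1 v h ih =>
    intro j h1 h2
    rcases Nat.eq_or_lt_of_le h1 with rfl | h1
    · exact h
    · exact ih j h1 h2
  | case2 v h => intro j h1 h2; omega

theorem re_lt (s t : List Char) (v : Nat) (hv : v < s.length) : re s t v < s.length := by
  fun_induction re s t v with
  | case1 v h ih => exact ih (by have := EB_lt h; omega)
  | case2 v h => exact hv

theorem re_succ (s t : List Char) (v : Nat) (h : EB s t v = true) :
    re s t v = re s t (v + 1) := by
  rw [re]; simp [h]

-- the visited list is always a prefix of trues
def pfx (N k : Nat) : List Bool := (List.range N).map (fun i => decide (i < k))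

theorem pfx_getD (N k u : Nat) : (pfx N k).getD u false = decide (u < N ∧ u < k) := by
  by_cases h : u < N
  · simp [pfx, List.getD_eq_getElem?_getD, List.getElem?_map, List.getElem?_range, h]
  · have : (pfx N k).length ≤ u := by simp [pfx]; omega
    rw [List.getD_eq_getElem?_getD, List.getElem?_eq_none (by simpa [pfx] using this)]
    simp; omega

theorem pfx_set (N k : Nat) (h : k < N) : (pfx N k).set k true = pfx N (k + 1) := by
  apply List.ext_getElem (by simp [pfx])
  intro i h1 h2
  simp only [pfx, List.getElem_set, List.getElem_map, List.getElem_range]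
  by_cases hik : k = i
  · subst hik; simp
  · simp [hik]; constructor <;> (intro; omega)

theorem replicate_false_eq_pfx (N : Nat) : List.replicate N false = pfx N 0 := by
  apply List.ext_getElem (by simp [pfx])
  intro i h1 h2
  simp [pfx, List.getElem_replicate]

-- adjacency list characterization
theorem getD_modify_nil {α : Type} (l : List α) (j v : Nat) (f : α → α) (d : α) :
    (l.modify j f).getD v d = if j = v ∧ v < l.length then f (l.getD v d) else l.getD v d := by
  rcases Nat.lt_or_ge v l.length with h | h
  · rw [List.getD_eq_getElem?_getD, List.getElem?_modify, List.getElem?_eq_getElem h]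
    by_cases hj : j = v <;>
      simp [hj, h, List.getD_eq_getElem?_getD, List.getElem?_eq_getElem h]
  · rw [List.getD_eq_getElem?_getD, List.getElem?_modify,
        List.getElem?_eq_none (by simpa using h)]
    simp [List.getD_eq_getElem?_getD, List.getElem?_eq_none (by simpa using h : l.length ≤ v)]
    intro; omega

theorem pvAddEdge_length (adj : List (List Nat)) (i : Nat) :
    (pvAddEdge adj i).length = adj.length := by
  simp [pvAddEdge]

theorem pvAddEdge_getD (adj : List (List Nat)) (i v : Nat) (h : i + 1 < adj.length) :
    (pvAddEdge adj i).getD v [] =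
      if v = i then adj.getD v [] ++ [i + 1]
      else if v = i + 1 then adj.getD v [] ++ [i]
      else adj.getD v [] := by
  unfold pvAddEdge
  rw [getD_modify_nil, List.length_modify, getD_modify_nil]
  split_ifs <;> first | rfl | omega

theorem foldAdd_length (l : List Nat) (adj : List (List Nat)) :
    (l.foldl pvAddEdge adj).length = adj.length := by
  induction l generalizing adj with
  | nil => rfl
  | cons a l ih => simp [List.foldl_cons, ih, pvAddEdge_length]

theorem foldAdd_mem (n : Nat) : ∀ (a : Nat) (adj : List (List Nat)), a + n < adj.length →
    ∀ v u, (u ∈ ((List.range' a n).foldl pvAddEdge adj).getD v [] ↔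
      u ∈ adj.getD v [] ∨ (a ≤ v ∧ v < a + n ∧ u = v + 1) ∨ (a ≤ u ∧ u < a + n ∧ u + 1 = v)) := by
  induction n with
  | zero => intro a adj h v u; simp; omega
  | succ n ih =>
    intro a adj h v u
    rw [List.range'_succ, List.foldl_cons,
        ih (a + 1) (pvAddEdge adj a) (by rw [pvAddEdge_length]; omega) v u,
        pvAddEdge_getD adj a v (by omega)]
    split_ifs with h1 h2 <;> (try simp only [List.mem_append, List.mem_singleton]) <;>
      by_cases hm : u ∈ adj.getD v [] <;> simp only [hm, true_or, false_or, true_iff, iff_true] <;>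
      first | omega | tauto

theorem getD_replicate_nil (N v : Nat) :
    (List.replicate N ([] : List Nat)).getD v [] = [] := by
  rcases Nat.lt_or_ge v N with h | h
  · rw [List.getD_eq_getElem?_getD, List.getElem?_eq_getElem (by simpa using h)]
    simp
  · rw [List.getD_eq_getElem?_getD, List.getElem?_eq_none (by simpa using h)]
    rfl

theorem buildFold_mem (s t : List Char) (N : Nat) (hL : 1 ≤ t.length) :
    ∀ (ps : List Nat) (adj : List (List Nat)), adj.length = N → (∀ p ∈ ps, p + t.length ≤ N) →
    ∀ v u, (u ∈ ((ps.foldl (fun adj start =>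
        if pvSlice s start (start + t.length) = t then
          (List.range' start (t.length - 1)).foldl pvAddEdge adj
        else adj) adj).getD v []) ↔
      u ∈ adj.getD v [] ∨ ∃ p ∈ ps, pvMatch s t p = true ∧
        ((p ≤ v ∧ v < p + t.length - 1 ∧ u = v + 1) ∨
         (p ≤ u ∧ u < p + t.length - 1 ∧ u + 1 = v))) := by
  intro ps
  induction ps with
  | nil => intro adj _ _ v u; simp
  | cons p ps ih =>
    intro adj hlen hps v u
    rw [List.foldl_cons]
    by_cases hmat : pvSlice s p (p + t.length) = t
    · rw [if_pos hmat]
      rw [ih _ (by rw [foldAdd_length]; exact hlen) (fun q hq => hps q (List.mem_cons_of_mem _ hq)) v u]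
      rw [foldAdd_mem (t.length - 1) p adj (by have := hps p List.mem_cons_self; omega) v u]
      have hmatch : pvMatch s t p = true := by simp [pvMatch, hmat]
      have harith : p + (t.length - 1) = p + t.length - 1 := by omega
      simp only [List.exists_mem_cons_iff, hmatch, true_and, harith]
      exact or_assoc
    · rw [if_neg hmat]
      rw [ih _ hlen (fun q hq => hps q (List.mem_cons_of_mem _ hq)) v u]
      have hmatch : pvMatch s t p = false := by simp [pvMatch, hmat]
      simp only [List.exists_mem_cons_iff, hmatch]
      simp

theorem pvBuildAdj_mem (s t : List Char) (hL : 1 ≤ t.length) (v u : Nat) :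
    u ∈ (pvBuildAdj s t s.length).getD v [] ↔
      ((u = v + 1 ∧ EB s t v = true) ∨ (u + 1 = v ∧ EB s t u = true)) := by
  unfold pvBuildAdj
  rw [buildFold_mem s t s.length hL _ _ (by simp)
      (by intro p hp; rw [List.mem_range] at hp; omega) v u]
  simp only [getD_replicate_nil, List.not_mem_nil, false_or, List.mem_range]
  constructor
  · rintro ⟨p, hp, hm, (⟨h1, h2, rfl⟩ | ⟨h1, h2, h3⟩)⟩
    · exact Or.inl ⟨rfl, (covB_iff s t _ v).2 ⟨p, hp, hm, h1, h2⟩⟩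
    · exact Or.inr ⟨h3, (covB_iff s t _ u).2 ⟨p, hp, hm, h1, h2⟩⟩
  · rintro (⟨rfl, hEB⟩ | ⟨hv, hEB⟩)
    · rcases (covB_iff s t _ v).1 hEB with ⟨p, hp, hm, h1, h2⟩
      exact ⟨p, hp, hm, Or.inl ⟨h1, h2, rfl⟩⟩
    · rcases (covB_iff s t _ u).1 hEB with ⟨p, hp, hm, h1, h2⟩
      exact ⟨p, hp, hm, Or.inr ⟨h1, h2, hv⟩⟩

-- dfs from v on a prefix-visited state visits exactly up to re s t v
theorem dfs_fold (s t : List Char) (adj : List (List Nat)) (fuel v : Nat)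
    (hv : v < s.length)
    (Hrec : EB s t v = true →
      pvDfs adj fuel (v + 1) (pfx s.length (v + 1)) = pfx s.length (re s t (v + 1) + 1)) :
    ∀ (l : List Nat), (∀ u ∈ l, (u = v + 1 ∧ EB s t v = true) ∨ (u + 1 = v ∧ EB s t u = true)) →
    ∀ m, v + 1 ≤ m →
    l.foldl (fun vis u => if vis.getD u false then vis else pvDfs adj fuel u vis)
        (pfx s.length m)
      = pfx s.length (if v + 1 ∈ l ∧ m = v + 1 then re s t (v + 1) + 1 else m) := by
  intro l
  induction l with
  | nil => intro _ m hm; simp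
  | cons u l ih =>
    intro hl m hm
    rw [List.foldl_cons]
    rcases hl u List.mem_cons_self with ⟨rfl, hEB⟩ | ⟨hu1, hEBu⟩
    · have huN : v + 1 < s.length := EB_lt hEB
      by_cases hm1 : m = v + 1
      · subst hm1
        rw [pfx_getD, if_neg (by simp), Hrec hEB]
        rw [ih (fun w hw => hl w (List.mem_cons_of_mem _ hw)) (re s t (v + 1) + 1)
            (by have := re_ge s t (v + 1); omega)]
        have hre : re s t (v + 1) + 1 ≠ v + 1 := by have := re_ge s t (v + 1); omega
        simp [hre, List.mem_cons]
      · rw [pfx_getD, if_pos (by simp only [decide_eq_true_iff]; omega)]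
        rw [ih (fun w hw => hl w (List.mem_cons_of_mem _ hw)) m hm]
        simp [List.mem_cons, hm1]
    · have huN : u < s.length := by omega
      rw [pfx_getD, if_pos (by simp only [decide_eq_true_iff]; omega)]
      rw [ih (fun w hw => hl w (List.mem_cons_of_mem _ hw)) m hm]
      have : ¬(v + 1 = u) := by omega
      simp [List.mem_cons, this]

theorem dfs_prefix (s t : List Char) (adj : List (List Nat))
    (Hadj : ∀ v u, u ∈ adj.getD v [] ↔
      ((u = v + 1 ∧ EB s t v = true) ∨ (u + 1 = v ∧ EB s t u = true))) :
    ∀ fuel v, v < s.length → re s t v + 1 ≤ v + fuel →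
    pvDfs adj fuel v (pfx s.length v) = pfx s.length (re s t v + 1) := by
  intro fuel
  induction fuel with
  | zero => intro v hv hf; have := re_ge s t v; omega
  | succ fuel ih =>
    intro v hv hf
    show (adj.getD v []).foldl _ ((pfx s.length v).set v true) = _
    rw [pfx_set _ _ hv]
    rw [dfs_fold s t adj fuel v hv
        (fun hEB => ih (v + 1) (EB_lt hEB)
          (by have := re_succ s t v hEB; omega))
        (adj.getD v []) (fun w hw => (Hadj v w).1 hw) (v + 1) (le_refl _)]
    by_cases hEB : EB s t v = true
    · have hmem : v + 1 ∈ adj.getD v [] := (Hadj v (v + 1)).2 (Or.inl ⟨rfl, hEB⟩)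
      simp only [hmem, true_and, if_pos rfl, and_self, ite_true]
      rw [← re_succ s t v hEB]
    · have hmem : v + 1 ∉ adj.getD v [] := by
        intro hmem
        rcases (Hadj v (v + 1)).1 hmem with ⟨_, h⟩ | ⟨h, _⟩
        · exact hEB h
        · omega
      simp only [hmem, false_and, if_false]
      have : re s t v = v := by rw [re]; simp [hEB]
      rw [this]

def bnd (s t : List Char) (w : Nat) : Bool := w == 0 || !(EB s t (w - 1))

theorem countLoop (s t : List Char) (adj : List (List Nat))
    (Hadj : ∀ v u, u ∈ adj.getD v [] ↔
      ((u = v + 1 ∧ EB s t v = true) ∨ (u + 1 = v ∧ EB s t u = true))) :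
    ∀ (n : Nat), ∀ (v k c : Nat), v + n = s.length → v ≤ k →
    (k = 0 ∨ (1 ≤ k ∧ EB s t (k - 1) = false)) →
    (∀ w, v ≤ w → w < k → bnd s t w = false) →
    ((List.range' v n).foldl
        (fun (st : Nat × List Bool) w =>
          if st.2.getD w false then st
          else (st.1 + 1, pvDfs adj (s.length + 1) w st.2))
        (c, pfx s.length k)).1
      = c + (List.range' v n).countP (bnd s t) := by
  intro n
  induction n with
  | zero => intro v k c _ _ _ _; simp
  | succ n ih =>
    intro v k c hsum hvk hk hinv
    have hvN : v < s.length := by omega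
    rw [List.range'_succ, List.foldl_cons, List.countP_cons]
    by_cases hvlt : v < k
    · rw [pfx_getD, if_pos (by simp only [decide_eq_true_iff]; omega)]
      rw [ih (v + 1) k c (by omega) (by omega) hk
          (fun w h1 h2 => hinv w (by omega) h2)]
      rw [hinv v (le_refl _) hvlt]
      simp
    · have hkv : k = v := by omega
      rw [hkv] at hk ⊢
      rw [pfx_getD, if_neg (by simp only [decide_eq_true_iff]; omega)]
      rw [dfs_prefix s t adj Hadj (s.length + 1) v hvN
          (by have := re_lt s t v hvN; omega)]
      rw [ih (v + 1) (re s t v + 1) (c + 1) (by omega)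
          (by have := re_ge s t v; omega)
          (Or.inr ⟨by omega, by rw [show re s t v + 1 - 1 = re s t v from by omega]; exact re_stop s t v⟩)
          (by
            intro w h1 h2
            have hE : EB s t (w - 1) = true := re_edges s t v (w - 1) (by omega) (by omega)
            simp [bnd, hE]; omega)]
      have hb : bnd s t v = true := by
        rcases hk with h0 | ⟨h1, h2⟩
        · simp [bnd, h0]
        · simp [bnd, h2]
      rw [hb]
      simp; omega

theorem countP_not_bool (l : List Nat) (p : Nat → Bool) :
    l.countP (fun a => !p a) = l.length - l.countP p := by
  induction l with
  | nil => simp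
  | cons a l ih =>
    have := List.countP_le_length (p := p) (l := l)
    rw [List.countP_cons, List.countP_cons, ih]
    cases h : p a <;> simp [h] <;> omega

theorem countP_bnd (s t : List Char) :
    (List.range s.length).countP (bnd s t) = s.length - ecnt s t := by
  unfold ecnt
  cases hN : s.length with
  | zero => simp
  | succ M =>
    rw [List.range_succ_eq_map, List.countP_cons, List.countP_map]
    have h0 : bnd s t 0 = true := by simp [bnd]
    have hcong : (List.range M).countP (bnd s t ∘ Nat.succ) =
        (List.range M).countP (fun w => !EB s t w) := by
      apply List.countP_congr
      intro w _
      simp [bnd, Function.comp]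
    rw [h0, hcong, countP_not_bool]
    have := List.countP_le_length (p := EB s t) (l := List.range M)
    simp only [List.length_range] at this
    simp
    omega

theorem find_components_eq (s t : List Char) (hL : 1 ≤ t.length) :
    find_components s t s.length = s.length - ecnt s t := by
  show ((List.range s.length).foldl _ (0, List.replicate s.length false)).1 = _
  rw [List.range_eq_range', replicate_false_eq_pfx]
  rw [countLoop s t (pvBuildAdj s t s.length) (pvBuildAdj_mem s t hL) s.length 0 0 0
      (by omega) (le_refl _) (Or.inl rfl) (fun w h1 h2 => absurd h2 (by omega))]
  rw [← List.range_eq_range', countP_bnd]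
  omega

-- B-side: the interval-union scan counts exactly the covered edges
theorem countP_or_split (l : List Nat) (a b : Nat → Bool) :
    l.countP (fun i => a i || b i) = l.countP a + l.countP (fun i => b i && !a i) := by
  induction l with
  | nil => simp
  | cons x l ih =>
    rw [List.countP_cons, List.countP_cons, List.countP_cons, ih]
    cases ha : a x <;> cases hb : b x <;> simp [ha, hb] <;> omega

theorem countP_interval (lo hi : Nat) : ∀ (m : Nat),
    (List.range m).countP (fun i => decide (lo ≤ i) && decide (i < hi)) = min hi m - lo := by
  intro m
  induction m with
  | zero => simp
  | succ m ih =>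
    rw [List.range_succ, List.countP_append, ih]
    by_cases hlo : lo ≤ m <;> by_cases hhi : m < hi <;>
      simp [List.countP_cons, hlo, hhi] <;> omega

theorem covB_succ (s t : List Char) (q i : Nat) :
    covB s t (q + 1) i =
      (covB s t q i || (pvMatch s t q && decide (q ≤ i) && decide (i < q + t.length - 1))) := by
  simp [covB, List.range_succ, List.any_append]

theorem scan_loop (s t : List Char) (L : Nat) (hL : t.length = L) (hL1 : 1 ≤ L) :
    ∀ (n : Nat), ∀ (q cov reach : Nat),
    q + n = s.length + 1 - L →
    cov = (List.range (s.length - 1)).countP (covB s t q) →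
    (∀ p, p < q → pvMatch s t p = true → p + L ≤ reach + 1) →
    (reach = 0 ∨ ∃ p, p < q ∧ pvMatch s t p = true ∧ reach = p + L - 1) →
    ((List.range' q n).foldl
        (fun (cr : Nat × Nat) p =>
          if pvSlice s p (p + L) = t then
            let hi := p + L - 1
            let lo := if cr.2 > p then cr.2 else p
            (if hi > lo then cr.1 + (hi - lo) else cr.1,
             if hi > cr.2 then hi else cr.2)
          else cr)
        (cov, reach)).1
      = (List.range (s.length - 1)).countP (covB s t (q + n)) := by
  intro n
  induction n with
  | zero => intro q cov reach _ hcov _ _; simpa using hcov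
  | succ n ih =>
    intro q cov reach hsum hcov ha hb
    have hqN : q + L ≤ s.length := by omega
    rw [List.range'_succ, List.foldl_cons]
    by_cases hm : pvSlice s q (q + L) = t
    · rw [if_pos hm]
      have hm' : pvMatch s t q = true := by simp [pvMatch, hL, hm]
      have hcovlt : ∀ i, covB s t q i = true → i < reach := by
        intro i hc
        rcases (covB_iff s t q i).1 hc with ⟨p, hp, hmp, h1, h2⟩
        have := ha p hp hmp
        rw [hL] at h2
        omega
      have hcovin : ∀ i, q ≤ i → i < reach → covB s t q i = true := by
        intro i h1 h2
        rcases hb with rfl | ⟨p0, hp0, hm0, hr⟩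
        · omega
        · exact (covB_iff s t q i).2 ⟨p0, hp0, hm0, by omega, by rw [hL]; omega⟩
      dsimp only
      rw [ih (q + 1) _ _ (by omega)
          (by
            -- cov' = countP (covB (q+1))
            have step1 : (List.range (s.length - 1)).countP (covB s t (q + 1)) =
                (List.range (s.length - 1)).countP
                  (fun i => covB s t q i || (decide (q ≤ i) && decide (i < q + L - 1))) := by
              apply List.countP_congr
              intro i _
              rw [covB_succ, hm', hL]
              simp
            have step2 : (List.range (s.length - 1)).countP
                  (fun i => covB s t q i || (decide (q ≤ i) && decide (i < q + L - 1))) =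
                (List.range (s.length - 1)).countP (covB s t q) +
                (List.range (s.length - 1)).countP
                  (fun i => (decide (q ≤ i) && decide (i < q + L - 1)) && !covB s t q i) := by
              exact countP_or_split _ _ _
            have step3 : (List.range (s.length - 1)).countP
                  (fun i => (decide (q ≤ i) && decide (i < q + L - 1)) && !covB s t q i) =
                (List.range (s.length - 1)).countP
                  (fun i => decide ((if reach > q then reach else q) ≤ i) &&
                            decide (i < q + L - 1)) := by
              apply List.countP_congr
              intro i _
              by_cases hc : covB s t q i = true
              · have h1 : i < reach := hcovlt i hc
                have h2 : ¬((if reach > q then reach else q) ≤ i) := by split <;> omega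
                simp [hc, h2]
              · rw [Bool.not_eq_true] at hc
                have hni : ¬(q ≤ i ∧ i < reach) := fun h => by
                  rw [hcovin i h.1 h.2] at hc; exact Bool.true_eq_false.mp hc
                simp only [hc, Bool.not_false, Bool.and_true]
                by_cases hrq : reach > q
                · rw [if_pos hrq,
                      show decide (q ≤ i) = decide (reach ≤ i) from
                        decide_eq_decide.mpr (by omega)]
                · rw [if_neg hrq]
            have step4 : (List.range (s.length - 1)).countP
                  (fun i => decide ((if reach > q then reach else q) ≤ i) &&
                            decide (i < q + L - 1)) =
                (q + L - 1) - (if reach > q then reach else q) := by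
              rw [countP_interval]
              have : min (q + L - 1) (s.length - 1) = q + L - 1 := by omega
              rw [this]
            rw [step1, step2, step3, step4, hcov]
            by_cases hrq : reach > q
            · rw [if_pos hrq]
              split <;> omega
            · rw [if_neg hrq]
              split <;> omega)
          (by
            intro p hp hmp
            rcases Nat.lt_or_ge p q with h | h
            · have := ha p h hmp
              split <;> omega
            · have : p = q := by omega
              subst this
              split <;> omega)
          (by
            by_cases hhr : q + L - 1 > reach
            · rw [if_pos hhr]
              exact Or.inr ⟨q, by omega, hm', rfl⟩
            · rw [if_neg hhr]
              rcases hb with h0 | ⟨p0, hp0, hm0, hr⟩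
              · exact Or.inl h0
              · exact Or.inr ⟨p0, by omega, hm0, hr⟩)]
      congr 2
      omega
    · rw [if_neg hm]
      have hm' : pvMatch s t q = false := by simp [pvMatch, hL, hm]
      rw [ih (q + 1) cov reach (by omega)
          (by
            rw [hcov]
            apply List.countP_congr
            intro i _
            rw [covB_succ, hm']
            simp)
          (by
            intro p hp hmp
            rcases Nat.lt_or_ge p q with h | h
            · exact ha p h hmp
            · have : p = q := by omega
              subst this
              rw [hm'] at hmp
              exact absurd hmp (by simp))
          (by
            rcases hb with h0 | ⟨p0, hp0, hm0, hr⟩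
            · exact Or.inl h0
            · exact Or.inr ⟨p0, by omega, hm0, hr⟩)]
      congr 2
      omega

theorem pvScan_eq (s t : List Char) (L : Nat) (hL : t.length = L) (hL1 : 1 ≤ L) :
    (pvScan s t s.length L).1 = ecnt s t := by
  unfold pvScan ecnt
  rw [List.range_eq_range']
  rw [scan_loop s t L hL hL1 (s.length + 1 - L) 0 0 0 (by omega)
      (by symm; rw [List.countP_eq_zero]; intro a _; simp [covB])
      (by intro p hp; omega)
      (Or.inl rfl)]
  have h1 : 0 + (s.length + 1 - L) = s.length + 1 - t.length := by omega
  rw [h1]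
  rfl

theorem pvSlice_length (s : List Char) (st L : Nat) (h : st + L ≤ s.length) :
    (pvSlice s st (st + L)).length = L := by
  unfold pvSlice
  rw [List.length_take, List.length_drop]
  omega

-- the min-array of A and the first-write dict of B stay in lockstep
def pvRel (N : Nat) (arr : List (Option Nat)) (d : PySem.Dict Nat Nat) (B : Nat) : Prop :=
  arr.length = N + 1 ∧ (∀ c, arr.getD c none = d.get? c) ∧
    (∀ c m, d.get? c = some m → m ≤ B)

theorem pvRel_mono {N : Nat} {arr : List (Option Nat)} {d : PySem.Dict Nat Nat} {B B' : Nat}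
    (h : pvRel N arr d B) (hB : B ≤ B') : pvRel N arr d B' :=
  ⟨h.1, h.2.1, fun c m hm => le_trans (h.2.2 c m hm) hB⟩

theorem rel_step (N : Nat) (arr : List (Option Nat)) (d : PySem.Dict Nat Nat) (L c : Nat)
    (hrel : pvRel N arr d L) (hc : c ≤ N) :
    pvRel N (arr.modify c (fun o => some (min (o.getD L) L)))
      (if (d.get? c).isSome then d else d.insert c L) L := by
  obtain ⟨hlen, hget, hbnd⟩ := hrel
  have hcd : c < arr.length := by omega
  by_cases hs : (d.get? c).isSome
  · rw [if_pos hs]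
    obtain ⟨m, hm⟩ := Option.isSome_iff_exists.mp hs
    have harr : arr.getD c none = some m := by rw [hget]; exact hm
    have hmin : min m L = m := by have := hbnd c m hm; omega
    refine ⟨by rw [List.length_modify]; exact hlen, ?_, hbnd⟩
    intro c'
    rw [getD_modify_nil]
    by_cases hcc : c = c'
    · subst hcc
      rw [if_pos ⟨rfl, hcd⟩, harr, hm]
      simp [hmin]
    · rw [if_neg (by tauto)]
      exact hget c'
  · rw [if_neg hs]
    have hnone : d.get? c = none := Option.not_isSome_iff_eq_none.mp hs
    have harr : arr.getD c none = none := by rw [hget]; exact hnone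
    refine ⟨by rw [List.length_modify]; exact hlen, ?_, ?_⟩
    · intro c'
      rw [getD_modify_nil]
      by_cases hcc : c = c'
      · subst hcc
        rw [if_pos ⟨rfl, hcd⟩, harr, PySem.Dict.get?_insert_self d c L]
        simp
      · rw [if_neg (by tauto), PySem.Dict.get?_insert_of_ne d L (fun h : c' = c => hcc h.symm)]
        exact hget c'
    · intro c' m hm
      by_cases hcc : c' = c
      · subst hcc
        rw [PySem.Dict.get?_insert_self] at hm
        exact le_of_eq (Option.some.inj hm).symm
      · rw [PySem.Dict.get?_insert_of_ne d L hcc] at hm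
        exact hbnd c' m hm

theorem c_eq (s : List Char) (L st : Nat) (hL1 : 1 ≤ L) (hstL : st + L ≤ s.length) :
    find_components s (pvSlice s st (st + L)) s.length
      = s.length - (pvScan s (pvSlice s st (st + L)) s.length L).1 := by
  have ht : (pvSlice s st (st + L)).length = L := pvSlice_length s st L hstL
  rw [find_components_eq s _ (by omega), pvScan_eq s _ L ht hL1]

theorem inner_rel (s : List Char) (L : Nat) (hL1 : 1 ≤ L) :
    ∀ (sts : List Nat) (arr : List (Option Nat)) (d : PySem.Dict Nat Nat),
    (∀ st ∈ sts, st + L ≤ s.length) → pvRel s.length arr d L →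
    pvRel s.length
      (sts.foldl (fun (arr : List (Option Nat)) start =>
        let t := pvSlice s start (start + L)
        let c := find_components s t s.length
        arr.modify c (fun o => some (min (o.getD L) L))) arr)
      (sts.foldl (fun (d : PySem.Dict Nat Nat) st =>
        let t := pvSlice s st (st + L)
        let c := s.length - (pvScan s t s.length L).1
        if (d.get? c).isSome then d else d.insert c L) d) L := by
  intro sts
  induction sts with
  | nil => intro arr d _ hrel; exact hrel
  | cons st sts ih =>
    intro arr d hsts hrel
    rw [List.foldl_cons, List.foldl_cons]
    have hstL : st + L ≤ s.length := hsts st List.mem_cons_self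
    apply ih _ _ (fun w hw => hsts w (List.mem_cons_of_mem _ hw))
    dsimp only
    rw [c_eq s L st hL1 hstL]
    exact rel_step s.length arr d L _ hrel (by omega)

def pvRelF (N : Nat) (arr : List (Option Nat)) (d : PySem.Dict Nat Nat) : Prop :=
  arr.length = N + 1 ∧ (∀ c, arr.getD c none = d.get? c)

theorem outer_rel (s : List Char) :
    ∀ (n L0 : Nat) (arr : List (Option Nat)) (d : PySem.Dict Nat Nat),
    1 ≤ L0 → L0 + n = s.length + 1 → pvRel s.length arr d L0 →
    pvRelF s.length
      ((List.range' L0 n).foldl (fun arr L =>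
        (List.range (s.length + 1 - L)).foldl (fun (arr : List (Option Nat)) start =>
          let t := pvSlice s start (start + L)
          let c := find_components s t s.length
          arr.modify c (fun o => some (min (o.getD L) L))) arr) arr)
      ((List.range' L0 n).foldl (fun d L =>
        (List.range (s.length + 1 - L)).foldl (fun (d : PySem.Dict Nat Nat) st =>
          let t := pvSlice s st (st + L)
          let c := s.length - (pvScan s t s.length L).1
          if (d.get? c).isSome then d else d.insert c L) d) d) := by
  intro n
  induction n with
  | zero => intro L0 arr d _ _ hrel; exact ⟨hrel.1, hrel.2.1⟩
  | succ n ih =>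
    intro L0 arr d hL0 hsum hrel
    rw [List.range'_succ, List.foldl_cons, List.foldl_cons]
    apply ih (L0 + 1) _ _ (by omega) (by omega)
    apply pvRel_mono _ (Nat.le_succ L0)
    apply inner_rel s L0 hL0
    · intro st hst
      rw [List.mem_range] at hst
      omega
    · exact hrel

theorem arr0_getD (N c : Nat) :
    ((List.replicate (N + 1) (none : Option Nat)).set N (some 1)).getD c none
      = if c = N then some 1 else none := by
  rw [List.getD_eq_getElem?_getD, List.getElem?_set]
  by_cases hc : c = N
  · subst hc; simp
  · simp only [show ¬(N = c) from fun h => hc h.symm, if_false, List.getElem?_replicate]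
    simp [hc]
    split <;> rfl

theorem d0_get? (N c : Nat) :
    ((PySem.Dict.empty : PySem.Dict Nat Nat).insert N 1).get? c
      = if c = N then some 1 else none := by
  by_cases hc : c = N
  · subst hc; rw [PySem.Dict.get?_insert_self]; simp
  · rw [PySem.Dict.get?_insert_of_ne _ 1 hc, if_neg hc]
    rfl

-- ===== VERDICT (by name: the statement is the Claim_ definition above) =====
theorem solve_spec : Claim_equal_solve := by
  unfold Claim_equal_solve Spec_solve
  intro S _
  unfold solve solve_alt
  dsimp only
  have hrel0 : pvRel S.toList.length
      ((List.replicate (S.toList.length + 1) (none : Option Nat)).set S.toList.length (some 1))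
      ((PySem.Dict.empty : PySem.Dict Nat Nat).insert S.toList.length 1) 1 := by
    refine ⟨by simp, ?_, ?_⟩
    · intro c
      rw [arr0_getD, d0_get?]
    · intro c m hm
      rw [d0_get?] at hm
      by_cases hc : c = S.toList.length
      · rw [if_pos hc] at hm
        exact le_of_eq (Option.some.inj hm).symm
      · rw [if_neg hc] at hm
        exact absurd hm (by simp)
  have hfin := outer_rel S.toList S.toList.length 1 _ _ (le_refl 1) (by omega) hrel0
  obtain ⟨hlen, hget⟩ := hfin
  dsimp only at hlen hget ⊢
  apply List.ext_getElem?
  intro i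
  rw [List.getElem?_map, List.getElem?_map, List.getElem?_drop]
  by_cases hi : i < S.toList.length
  · rw [List.getElem?_range' hi, List.getElem?_eq_getElem (by omega : 1 + i < _)]
    simp only [one_mul, Option.map_some]
    have hx := hget (1 + i)
    rw [List.getD_eq_getElem?_getD, List.getElem?_eq_getElem (by omega : 1 + i < _)] at hx
    simp only [Option.getD_some] at hx
    rw [hx, PySem.Dict.getD_eq_get?_getD]
  · rw [List.getElem?_eq_none (by omega), List.getElem?_eq_none (by rw [List.length_range']; omega)]
    rfl
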